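-- pv_equiv track=rewrite | github.com/AngelicaDiazB14/Projects | sopa_de_letras/python convert_to_utf8.py | anticipar_direccion
-- ===== SOURCE A (Python) =====
-- def anticipar_direccion(modos_de_acomodar,largo_de_palabra,posicion_palabras,fila_aleatoria,columna_aleatoria,largo_matriz,ancho_matriz):
-- 	#Método para montar las palabras en la matriz, verificando que no quede fuera ninguna
-- 	if (modos_de_acomodar==1):
-- 		for x in range(largo_de_palabra):
-- 			columna_aleatoria+=1
-- 			if[fila_aleatoria,columna_aleatoria] in posicion_palabras:
-- 				return True
-- 			if(fila_aleatoria<0 or columna_aleatoria<0):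
-- 				return True
-- 			if(fila_aleatoria>=largo_matriz or fila_aleatoria>=ancho_matriz):
-- 				return True
-- 			if(columna_aleatoria>=largo_matriz or columna_aleatoria>=ancho_matriz):
-- 				return True
-- 	if (modos_de_acomodar==2):
-- 		for x in range(largo_de_palabra):
-- 			columna_aleatoria-=1
-- 			if[fila_aleatoria,columna_aleatoria] in posicion_palabras:
-- 				return True
-- 			if(fila_aleatoria<0 or columna_aleatoria<0):
-- 				return True
-- 			if(fila_aleatoria>=largo_matriz or fila_aleatoria>=ancho_matriz):
-- 				return True
-- 			if(columna_aleatoria>=largo_matriz or columna_aleatoria>=ancho_matriz):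
-- 				return True
-- 	if (modos_de_acomodar==3):
-- 		for x in range(largo_de_palabra):
-- 			fila_aleatoria-=1
-- 			if[fila_aleatoria,columna_aleatoria] in posicion_palabras:
-- 				return True
-- 			if(fila_aleatoria<0 or columna_aleatoria<0):
-- 				return True
-- 			if(fila_aleatoria>=largo_matriz or fila_aleatoria>=ancho_matriz):
-- 				return True
-- 			if(columna_aleatoria>=largo_matriz or columna_aleatoria>=ancho_matriz):
-- 				return True
-- 	if (modos_de_acomodar==4):
-- 		for x in range(largo_de_palabra):
-- 			fila_aleatoria+=1
-- 			if[fila_aleatoria,columna_aleatoria] in posicion_palabras: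
-- 				return True
-- 			if(fila_aleatoria<0 or columna_aleatoria<0):
-- 				return True
-- 			if(fila_aleatoria>=largo_matriz or fila_aleatoria>=ancho_matriz):
-- 				return True
-- 			if(columna_aleatoria>=largo_matriz or columna_aleatoria>=ancho_matriz):
-- 				return True
-- 	if (modos_de_acomodar==5):
-- 		for x in range(largo_de_palabra):
-- 			fila_aleatoria-=1
-- 			columna_aleatoria-=1
-- 			if[fila_aleatoria,columna_aleatoria] in posicion_palabras:
-- 				return True
-- 			if(fila_aleatoria<0 or columna_aleatoria<0):
-- 				return True
-- 			if(fila_aleatoria>=largo_matriz or fila_aleatoria>=ancho_matriz):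
-- 				return True
-- 			if(columna_aleatoria>=largo_matriz or columna_aleatoria>=ancho_matriz):
-- 				return True
-- 	if (modos_de_acomodar==6):
-- 		for x in range(largo_de_palabra):
-- 			fila_aleatoria+=1
-- 			columna_aleatoria-=1
-- 			if[fila_aleatoria,columna_aleatoria] in posicion_palabras:
-- 				return True
-- 			if(fila_aleatoria<0 or columna_aleatoria<0):
-- 				return True
-- 			if(fila_aleatoria>=largo_matriz or fila_aleatoria>=ancho_matriz):
-- 				return True
-- 			if(columna_aleatoria>=largo_matriz or columna_aleatoria>=ancho_matriz):
-- 				return True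
-- 	if (modos_de_acomodar==7):
-- 		for x in range(largo_de_palabra):
-- 			fila_aleatoria-=1
-- 			columna_aleatoria+=1
-- 			if[fila_aleatoria,columna_aleatoria] in posicion_palabras:
-- 				return True
-- 			if(fila_aleatoria<0 or columna_aleatoria<0):
-- 				return True
-- 			if(fila_aleatoria>=largo_matriz or fila_aleatoria>=ancho_matriz):
-- 				return True
-- 			if(columna_aleatoria>=largo_matriz or columna_aleatoria>=ancho_matriz):
-- 				return True
-- 	if (modos_de_acomodar==8):
-- 		for x in range(largo_de_palabra):
-- 			fila_aleatoria+=1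
-- 			columna_aleatoria+=1
-- 			if [fila_aleatoria,columna_aleatoria] in posicion_palabras:
-- 				return True
-- 			if(fila_aleatoria<0 or columna_aleatoria<0):
-- 				return True
-- 			if(fila_aleatoria>=largo_matriz or fila_aleatoria>=ancho_matriz):
-- 				return True
-- 			if(columna_aleatoria>=largo_matriz or columna_aleatoria>=ancho_matriz):
-- 				return True
-- 	return False
-- ===== SOURCE B (Python) =====
-- def anticipar_direccion(modos_de_acomodar, largo_de_palabra, posicion_palabras, fila_aleatoria, columna_aleatoria, largo_matriz, ancho_matriz):
--     # Inverted algorithm: instead of walking the word cell by cell,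
--     # do an O(1) bounds test on the two endpoint cells (the coordinates are monotone
--     # along the line, so only the first and last cells can violate an interval bound)
--     # and then a single pass over posicion_palabras, solving each stored cell for its
--     # step index x on the line and checking 1 <= x <= length.
--     deltas = {1: (0, 1), 2: (0, -1), 3: (-1, 0), 4: (1, 0),
--               5: (-1, -1), 6: (1, -1), 7: (-1, 1), 8: (1, 1)}
--     if modos_de_acomodar not in deltas or largo_de_palabra <= 0:
--         return False
--     df, dc = deltas[modos_de_acomodar]
--     lim = min(largo_matriz, ancho_matriz)
--     n = largo_de_palabra
--
--     for x in (1, n):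
--         ff = fila_aleatoria + df * x
--         cc = columna_aleatoria + dc * x
--         if not (0 <= ff < lim and 0 <= cc < lim):
--             return True
--
--     for p in posicion_palabras:
--         if len(p) == 2:
--             a = p[0] - fila_aleatoria
--             b = p[1] - columna_aleatoria
--             if df == 0:
--                 ok, x = (a == 0), b * dc
--             elif dc == 0:
--                 ok, x = (b == 0), a * df
--             else:
--                 x = a * df
--                 ok = (b * dc == x)
--             if ok and 1 <= x <= n:
--                 return True
--     return False
-- ===== Notes on version B (the rewrite author's own statement) =====
-- stated objective: alternative
-- what changed: Inverts the traversal: instead of walking the word cell by cell and testing each cell against the list, B does a constant-size bounds test on the two endpoint cells (coordinates are monotone along the line) and one pass over posicion_palabras solving each stored cell for its step index on the line.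
import Mathlib
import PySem

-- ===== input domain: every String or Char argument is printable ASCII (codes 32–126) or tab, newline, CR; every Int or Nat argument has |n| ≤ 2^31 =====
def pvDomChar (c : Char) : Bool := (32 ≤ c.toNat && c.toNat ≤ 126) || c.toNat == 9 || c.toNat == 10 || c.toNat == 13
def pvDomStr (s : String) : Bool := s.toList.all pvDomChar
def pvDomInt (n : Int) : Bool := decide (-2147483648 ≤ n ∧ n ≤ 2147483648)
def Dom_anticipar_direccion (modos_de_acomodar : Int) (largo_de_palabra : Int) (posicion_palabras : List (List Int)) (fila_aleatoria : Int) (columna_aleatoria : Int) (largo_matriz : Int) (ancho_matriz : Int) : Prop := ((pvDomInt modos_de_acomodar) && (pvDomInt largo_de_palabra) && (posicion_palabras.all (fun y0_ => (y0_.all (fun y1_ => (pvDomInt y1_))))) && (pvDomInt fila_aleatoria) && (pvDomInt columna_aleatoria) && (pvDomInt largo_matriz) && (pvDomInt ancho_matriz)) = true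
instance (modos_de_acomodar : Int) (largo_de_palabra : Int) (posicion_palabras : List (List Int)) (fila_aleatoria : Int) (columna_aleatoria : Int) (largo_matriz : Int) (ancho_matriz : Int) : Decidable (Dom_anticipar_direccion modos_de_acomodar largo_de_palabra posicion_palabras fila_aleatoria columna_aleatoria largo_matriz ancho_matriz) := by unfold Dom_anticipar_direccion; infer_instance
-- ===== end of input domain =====

-- B inverts A's traversal: a constant-size endpoint bounds test plus one pass over the
-- stored positions solving each for its step index, instead of walking the word cell by
-- cell (objective: alternative algorithm).

-- ===== PORT A =====
-- A's eight loop bodies are identical up to the per-step increment; this helper is that body,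
-- called with the literal step of each branch (state (f, c) mutated step by step, early return True).
def antLoopA (df dc : Int) (k : Nat) (pos : List (List Int)) (f c L A : Int) : Bool :=
  match k with
  | 0 => false
  | Nat.succ k =>
    let f' := f + df
    let c' := c + dc
    if pos.contains [f', c'] then true
    else if f' < 0 ∨ c' < 0 then true
    else if f' ≥ L ∨ f' ≥ A then true
    else if c' ≥ L ∨ c' ≥ A then true
    else antLoopA df dc k pos f' c' L A

def anticipar_direccion (modos_de_acomodar : Int) (largo_de_palabra : Int) (posicion_palabras : List (List Int)) (fila_aleatoria : Int) (columna_aleatoria : Int) (largo_matriz : Int) (ancho_matriz : Int) : Bool :=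
  if modos_de_acomodar = 1 ∧ antLoopA 0 1 largo_de_palabra.toNat posicion_palabras fila_aleatoria columna_aleatoria largo_matriz ancho_matriz then true
  else if modos_de_acomodar = 2 ∧ antLoopA 0 (-1) largo_de_palabra.toNat posicion_palabras fila_aleatoria columna_aleatoria largo_matriz ancho_matriz then true
  else if modos_de_acomodar = 3 ∧ antLoopA (-1) 0 largo_de_palabra.toNat posicion_palabras fila_aleatoria columna_aleatoria largo_matriz ancho_matriz then true
  else if modos_de_acomodar = 4 ∧ antLoopA 1 0 largo_de_palabra.toNat posicion_palabras fila_aleatoria columna_aleatoria largo_matriz ancho_matriz then true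
  else if modos_de_acomodar = 5 ∧ antLoopA (-1) (-1) largo_de_palabra.toNat posicion_palabras fila_aleatoria columna_aleatoria largo_matriz ancho_matriz then true
  else if modos_de_acomodar = 6 ∧ antLoopA 1 (-1) largo_de_palabra.toNat posicion_palabras fila_aleatoria columna_aleatoria largo_matriz ancho_matriz then true
  else if modos_de_acomodar = 7 ∧ antLoopA (-1) 1 largo_de_palabra.toNat posicion_palabras fila_aleatoria columna_aleatoria largo_matriz ancho_matriz then true
  else if modos_de_acomodar = 8 ∧ antLoopA 1 1 largo_de_palabra.toNat posicion_palabras fila_aleatoria columna_aleatoria largo_matriz ancho_matriz then true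
  else false

-- ===== PORT B =====
def deltasB : PySem.Dict Int (Int × Int) :=
  PySem.Dict.ofList [(1, (0, 1)), (2, (0, -1)), (3, (-1, 0)), (4, (1, 0)),
                     (5, (-1, -1)), (6, (1, -1)), (7, (-1, 1)), (8, (1, 1))]

-- Source B's per-position solver: (ok, x) with x the candidate step index of (a, b) on the line
def solveStepB (df dc a b : Int) : Bool × Int :=
  if df = 0 then (decide (a = 0), b * dc)
  else if dc = 0 then (decide (b = 0), a * df)
  else (decide (b * dc = a * df), a * df)

-- Source B's body of the `for p in posicion_palabras` loop (early return True = any)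
def hitPosB (df dc n f c : Int) (p : List Int) : Bool :=
  match p with
  | [pf, pc] =>
    let r := solveStepB df dc (pf - f) (pc - c)
    r.1 && decide (1 ≤ r.2) && decide (r.2 ≤ n)
  | _ => false

-- Source B's endpoint bounds test `not (0 <= ff < lim and 0 <= cc < lim)`
def outEndB (lim ff cc : Int) : Bool :=
  !(decide (0 ≤ ff) && decide (ff < lim) && decide (0 ≤ cc) && decide (cc < lim))

def anticipar_direccion_alt (modos_de_acomodar : Int) (largo_de_palabra : Int) (posicion_palabras : List (List Int)) (fila_aleatoria : Int) (columna_aleatoria : Int) (largo_matriz : Int) (ancho_matriz : Int) : Bool :=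
  match PySem.Dict.get? deltasB modos_de_acomodar with
  | none => false
  | some (df, dc) =>
    if largo_de_palabra ≤ 0 then false
    else
      let lim := min largo_matriz ancho_matriz
      let n := largo_de_palabra
      (([1, n] : List Int).any fun x =>
          outEndB lim (fila_aleatoria + df * x) (columna_aleatoria + dc * x))
        || posicion_palabras.any (hitPosB df dc n fila_aleatoria columna_aleatoria)

-- ===== PRECONDITION & SPEC =====
def Spec_anticipar_direccion (modos_de_acomodar : Int) (largo_de_palabra : Int) (posicion_palabras : List (List Int)) (fila_aleatoria : Int) (columna_aleatoria : Int) (largo_matriz : Int) (ancho_matriz : Int) (out : Bool) : Prop := out = anticipar_direccion_alt modos_de_acomodar largo_de_palabra posicion_palabras fila_aleatoria columna_aleatoria largo_matriz ancho_matriz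
instance (modos_de_acomodar : Int) (largo_de_palabra : Int) (posicion_palabras : List (List Int)) (fila_aleatoria : Int) (columna_aleatoria : Int) (largo_matriz : Int) (ancho_matriz : Int) (out : Bool) : Decidable (Spec_anticipar_direccion modos_de_acomodar largo_de_palabra posicion_palabras fila_aleatoria columna_aleatoria largo_matriz ancho_matriz out) := by unfold Spec_anticipar_direccion; infer_instance

-- ===== CLAIM =====
def Claim_equal_anticipar_direccion : Prop := ∀ (modos_de_acomodar : Int) (largo_de_palabra : Int) (posicion_palabras : List (List Int)) (fila_aleatoria : Int) (columna_aleatoria : Int) (largo_matriz : Int) (ancho_matriz : Int), Dom_anticipar_direccion modos_de_acomodar largo_de_palabra posicion_palabras fila_aleatoria columna_aleatoria largo_matriz ancho_matriz → Spec_anticipar_direccion modos_de_acomodar largo_de_palabra posicion_palabras fila_aleatoria columna_aleatoria largo_matriz ancho_matriz (anticipar_direccion modos_de_acomodar largo_de_palabra posicion_palabras fila_aleatoria columna_aleatoria largo_matriz ancho_matriz)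

-- ===== LEMMAS AND PROOFS =====

-- A's merged per-step condition (proof device)
def chocaB (pos : List (List Int)) (lim ff cc : Int) : Bool :=
  pos.contains [ff, cc] || !(decide (0 ≤ ff) && decide (ff < lim) && decide (0 ≤ cc) && decide (cc < lim))

lemma step_cond_eq (pos : List (List Int)) (L A f c : Int) :
    ((if pos.contains [f, c] then true
      else if f < 0 ∨ c < 0 then true
      else if f ≥ L ∨ f ≥ A then true
      else if c ≥ L ∨ c ≥ A then true
      else false) : Bool) = chocaB pos (min L A) f c := by
  simp only [chocaB]
  split_ifs with h1 h2 h3 h4 <;> simp_all <;> omega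

lemma antLoopA_eq_any (df dc L A : Int) (pos : List (List Int)) :
    ∀ (k : Nat) (f c : Int),
      antLoopA df dc k pos f c L A =
      ((List.range k).any fun i =>
        chocaB pos (min L A) (f + df * ((i : Int) + 1)) (c + dc * ((i : Int) + 1))) := by
  intro k
  induction k with
  | zero => intro f c; simp [antLoopA]
  | succ k ih =>
    intro f c
    have hsplit : antLoopA df dc (k + 1) pos f c L A =
        ((if pos.contains [f + df, c + dc] then true
          else if f + df < 0 ∨ c + dc < 0 then true
          else if f + df ≥ L ∨ f + df ≥ A then true
          else if c + dc ≥ L ∨ c + dc ≥ A then true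
          else false) || antLoopA df dc k pos (f + df) (c + dc) L A) := by
      show (if pos.contains [f + df, c + dc] then true
          else if f + df < 0 ∨ c + dc < 0 then true
          else if f + df ≥ L ∨ f + df ≥ A then true
          else if c + dc ≥ L ∨ c + dc ≥ A then true
          else antLoopA df dc k pos (f + df) (c + dc) L A) = _
      split_ifs
      all_goals simp
    rw [hsplit, step_cond_eq, ih (f + df) (c + dc),
        List.range_succ_eq_map, List.any_cons, List.any_map]
    simp only [Function.comp_def, Nat.cast_zero, zero_add, mul_one]
    congr 1
    congr 1
    funext i
    have e1 : f + df + df * ((i : Int) + 1) = f + df * ((((i + 1) : Nat) : Int) + 1) := by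
      push_cast; ring
    have e2 : c + dc + dc * ((i : Int) + 1) = c + dc * ((((i + 1) : Nat) : Int) + 1) := by
      push_cast; ring
    rw [e1, e2]

-- shift the Nat range to an Int interval [1, n]
lemma range_shift_iff (k : Nat) (P : Int → Prop) :
    (∃ i : Nat, i < k ∧ P ((i : Int) + 1)) ↔ ∃ x : Int, 1 ≤ x ∧ x ≤ (k : Int) ∧ P x := by
  constructor
  · rintro ⟨i, hi, hp⟩
    exact ⟨(i : Int) + 1, by omega, by omega, hp⟩
  · rintro ⟨x, h1, h2, hp⟩
    refine ⟨(x - 1).toNat, by omega, ?_⟩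
    have : ((x - 1).toNat : Int) + 1 = x := by omega
    rwa [this]

lemma outEndB_iff (lim ff cc : Int) :
    outEndB lim ff cc = true ↔ ¬ (0 ≤ ff ∧ ff < lim ∧ 0 ≤ cc ∧ cc < lim) := by
  simp [outEndB]; omega

-- monotone coordinates: a bounds violation somewhere on [1, n] is one at an endpoint
lemma out_exists_iff (df dc : Int)
    (hdf : df = -1 ∨ df = 0 ∨ df = 1) (hdc : dc = -1 ∨ dc = 0 ∨ dc = 1)
    (n lim f c : Int) (hn : 0 < n) :
    (∃ x : Int, 1 ≤ x ∧ x ≤ n ∧ outEndB lim (f + df * x) (c + dc * x) = true) ↔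
      (outEndB lim (f + df * 1) (c + dc * 1) = true ∨
       outEndB lim (f + df * n) (c + dc * n) = true) := by
  simp only [outEndB_iff]
  constructor
  · rintro ⟨x, h1, h2, h3⟩
    rcases hdf with rfl | rfl | rfl <;> rcases hdc with rfl | rfl | rfl <;> omega
  · rintro (h | h)
    · exact ⟨1, by omega, by omega, h⟩
    · exact ⟨n, by omega, by omega, h⟩

-- Source B's solver characterised: hit ⟺ the cell lies on the line at a step in [1, n]
lemma hit_iff (df dc : Int)
    (hdf : df = -1 ∨ df = 0 ∨ df = 1) (hdc : dc = -1 ∨ dc = 0 ∨ dc = 1)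
    (hne : ¬(df = 0 ∧ dc = 0)) (n f c : Int) (p : List Int) :
    hitPosB df dc n f c p = true ↔
      ∃ x : Int, 1 ≤ x ∧ x ≤ n ∧ p = [f + df * x, c + dc * x] := by
  match p with
  | [] => simp [hitPosB]
  | [_] => simp [hitPosB]
  | pf :: pc :: q :: rest => simp [hitPosB]
  | [pf, pc] =>
    simp only [List.cons.injEq, and_true]
    rcases hdf with rfl | rfl | rfl <;> rcases hdc with rfl | rfl | rfl <;>
      first
        | exact absurd ⟨rfl, rfl⟩ hne
        | (simp only [hitPosB, solveStepB]
           norm_num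
           constructor
           · rintro ⟨⟨hok, h1⟩, h2⟩
             first
              | exact ⟨pc - c, by omega, by omega, by omega, by omega⟩
              | exact ⟨c - pc, by omega, by omega, by omega, by omega⟩
              | exact ⟨pf - f, by omega, by omega, by omega, by omega⟩
              | exact ⟨f - pf, by omega, by omega, by omega, by omega⟩
           · rintro ⟨x, h1, h2, h3, h4⟩
             refine ⟨⟨by omega, by omega⟩, by omega⟩)

-- master lemma: A's loop equals B's endpoint test + one pass over the positions
lemma master (df dc : Int)
    (hdf : df = -1 ∨ df = 0 ∨ df = 1) (hdc : dc = -1 ∨ dc = 0 ∨ dc = 1)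
    (hne : ¬(df = 0 ∧ dc = 0)) (n : Int) (hn : 0 < n)
    (pos : List (List Int)) (f c L A : Int) :
    antLoopA df dc n.toNat pos f c L A =
      ((([1, n] : List Int).any fun x =>
          outEndB (min L A) (f + df * x) (c + dc * x))
        || pos.any (hitPosB df dc n f c)) := by
  rw [antLoopA_eq_any]
  rw [Bool.eq_iff_iff]
  simp only [List.any_eq_true, List.mem_range, chocaB, Bool.or_eq_true,
    List.contains_eq_mem, decide_eq_true_eq, List.mem_cons, List.not_mem_nil, or_false]
  have hout : ∀ ff cc : Int,
      (!(decide (0 ≤ ff) && decide (ff < min L A) && decide (0 ≤ cc) && decide (cc < min L A))) = true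
        ↔ outEndB (min L A) ff cc = true := by
    intro ff cc; simp [outEndB]
  constructor
  · rintro ⟨i, hi, hmem | hbound⟩
    · right
      exact ⟨[f + df * ((i : Int) + 1), c + dc * ((i : Int) + 1)], hmem,
        (hit_iff df dc hdf hdc hne n f c _).mpr ⟨(i : Int) + 1, by omega, by omega, rfl⟩⟩
    · left
      have hx : ∃ x : Int, 1 ≤ x ∧ x ≤ n ∧ outEndB (min L A) (f + df * x) (c + dc * x) = true := by
        refine ⟨(i : Int) + 1, by omega, by omega, ?_⟩
        exact (hout _ _).mp hbound
      rcases (out_exists_iff df dc hdf hdc n (min L A) f c hn).mp hx with h | h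
      · exact ⟨1, Or.inl rfl, by simpa using h⟩
      · exact ⟨n, Or.inr rfl, by simpa using h⟩
  · rintro (⟨x, hx, hb⟩ | ⟨p, hp, hhit⟩)
    · have hx' : ∃ y : Int, 1 ≤ y ∧ y ≤ n ∧ outEndB (min L A) (f + df * y) (c + dc * y) = true := by
        rcases hx with h | h <;> rw [h] at hb
        · exact (out_exists_iff df dc hdf hdc n (min L A) f c hn).mpr (Or.inl (by simpa using hb))
        · exact (out_exists_iff df dc hdf hdc n (min L A) f c hn).mpr (Or.inr (by simpa using hb))
      rcases (range_shift_iff n.toNat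
          (fun y => outEndB (min L A) (f + df * y) (c + dc * y) = true)).mpr
          (by rcases hx' with ⟨y, h1, h2, h3⟩; exact ⟨y, h1, by omega, h3⟩) with ⟨i, hi, hio⟩
      exact ⟨i, hi, Or.inr ((hout _ _).mpr hio)⟩
    · rcases (hit_iff df dc hdf hdc hne n f c p).mp hhit with ⟨x, h1, h2, rfl⟩
      rcases (range_shift_iff n.toNat (fun y => [f + df * x, c + dc * x] = [f + df * y, c + dc * y])).mpr
          ⟨x, h1, by omega, rfl⟩ with ⟨i, hi, hie⟩
      exact ⟨i, hi, Or.inl (hie ▸ hp)⟩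

lemma alt_mode (m : Int) (df dc : Int)
    (h : PySem.Dict.get? deltasB m = some (df, dc))
    (n : Int) (hn : 0 < n) (pos : List (List Int)) (f c L A : Int) :
    anticipar_direccion_alt m n pos f c L A =
      ((([1, n] : List Int).any fun x =>
          outEndB (min L A) (f + df * x) (c + dc * x))
        || pos.any (hitPosB df dc n f c)) := by
  simp only [anticipar_direccion_alt, h]
  rw [if_neg (by omega)]

lemma alt_nonpos (m n : Int) (hn : n ≤ 0) (pos : List (List Int)) (f c L A : Int) :
    anticipar_direccion_alt m n pos f c L A = false := by
  unfold anticipar_direccion_alt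
  cases PySem.Dict.get? deltasB m with
  | none => rfl
  | some p => cases p; simp [hn]

-- ===== VERDICT =====
theorem anticipar_direccion_spec : Claim_equal_anticipar_direccion := by
  intro m n pos f c L A _
  unfold Spec_anticipar_direccion
  by_cases hn : 0 < n
  case neg =>
    have hk : n.toNat = 0 := by omega
    rw [alt_nonpos m n (by omega)]
    norm_num [anticipar_direccion, hk, antLoopA]
  case pos =>
    by_cases h1 : m = 1
    · subst h1
      rw [alt_mode 1 0 1 (by decide) n hn,
        show anticipar_direccion 1 n pos f c L A = antLoopA 0 1 n.toNat pos f c L A from by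
          norm_num [anticipar_direccion],
        master 0 1 (by tauto) (by tauto) (by omega) n hn]
    by_cases h2 : m = 2
    · subst h2
      rw [alt_mode 2 0 (-1) (by decide) n hn,
        show anticipar_direccion 2 n pos f c L A = antLoopA 0 (-1) n.toNat pos f c L A from by
          norm_num [anticipar_direccion],
        master 0 (-1) (by tauto) (by tauto) (by omega) n hn]
    by_cases h3 : m = 3
    · subst h3
      rw [alt_mode 3 (-1) 0 (by decide) n hn,
        show anticipar_direccion 3 n pos f c L A = antLoopA (-1) 0 n.toNat pos f c L A from by
          norm_num [anticipar_direccion],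
        master (-1) 0 (by tauto) (by tauto) (by omega) n hn]
    by_cases h4 : m = 4
    · subst h4
      rw [alt_mode 4 1 0 (by decide) n hn,
        show anticipar_direccion 4 n pos f c L A = antLoopA 1 0 n.toNat pos f c L A from by
          norm_num [anticipar_direccion],
        master 1 0 (by tauto) (by tauto) (by omega) n hn]
    by_cases h5 : m = 5
    · subst h5
      rw [alt_mode 5 (-1) (-1) (by decide) n hn,
        show anticipar_direccion 5 n pos f c L A = antLoopA (-1) (-1) n.toNat pos f c L A from by
          norm_num [anticipar_direccion],
        master (-1) (-1) (by tauto) (by tauto) (by omega) n hn]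
    by_cases h6 : m = 6
    · subst h6
      rw [alt_mode 6 1 (-1) (by decide) n hn,
        show anticipar_direccion 6 n pos f c L A = antLoopA 1 (-1) n.toNat pos f c L A from by
          norm_num [anticipar_direccion],
        master 1 (-1) (by tauto) (by tauto) (by omega) n hn]
    by_cases h7 : m = 7
    · subst h7
      rw [alt_mode 7 (-1) 1 (by decide) n hn,
        show anticipar_direccion 7 n pos f c L A = antLoopA (-1) 1 n.toNat pos f c L A from by
          norm_num [anticipar_direccion],
        master (-1) 1 (by tauto) (by tauto) (by omega) n hn]
    by_cases h8 : m = 8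
    · subst h8
      rw [alt_mode 8 1 1 (by decide) n hn,
        show anticipar_direccion 8 n pos f c L A = antLoopA 1 1 n.toNat pos f c L A from by
          norm_num [anticipar_direccion],
        master 1 1 (by tauto) (by tauto) (by omega) n hn]
    have hget : PySem.Dict.get? deltasB m = none := by
      rw [show deltasB = PySem.Dict.mk [(1, (0, 1)), (2, (0, -1)), (3, (-1, 0)), (4, (1, 0)),
            (5, (-1, -1)), (6, (1, -1)), (7, (-1, 1)), (8, (1, 1))] from by decide]
      simp only [PySem.Dict.get?_mk_cons, beq_iff_eq]
      split_ifs <;> first | omega | simp [PySem.Dict.get?]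
    rw [show anticipar_direccion_alt m n pos f c L A = false from by
      simp [anticipar_direccion_alt, hget]]
    norm_num [anticipar_direccion, h1, h2, h3, h4, h5, h6, h7, h8]
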